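-- pv_equiv track=rewrite | github.com/ReshetnyakRoman/HakerRankSolutions | Algorithms/Constructive Algorithms/Lovely Triplets.py | splitTreesForTwo
-- ===== SOURCE A (Python) =====
-- def combinations(n):
--     return n*(n-1)*(n-2)//6
--
-- def splitTreesForTwo(P):
--     forest = []
--
--     while P > 0:
--         if P<4:
--             forest.append(3)
--             P=P-1
--         else:
--             for i in range(P,2,-1):
--                 if combinations(i) <= P and P - combinations(i) >= 0:
--                     forest.append(i)
--                     break;
--
--             P = P - combinations(i)
--     return forest
-- ===== SOURCE B (Python) =====
-- def combinations(n):
--     return n * (n - 1) * (n - 2) // 6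
--
--
-- def splitTreesForTwo(P):
--     forest = []
--     while P >= 4:
--         # exponential growth: find hi with combinations(hi) > P
--         hi = 4
--         while combinations(hi) <= P:
--             hi *= 2
--         # binary search the largest lo in [3, hi) with combinations(lo) <= P
--         lo = 3
--         while hi - lo > 1:
--             mid = (lo + hi) // 2
--             if combinations(mid) <= P:
--                 lo = mid
--             else:
--                 hi = mid
--         forest.append(lo)
--         P -= combinations(lo)
--     forest.extend([3] * P)
--     return forest
-- ===== Notes on version B (the rewrite author's own statement) =====
-- stated objective: faster
-- what changed: The linear downward scan from P for the largest i with C(i,3) <= P is replaced by exponential doubling plus binary search, and the P<4 tail loop by a single list extension.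
import Mathlib
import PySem

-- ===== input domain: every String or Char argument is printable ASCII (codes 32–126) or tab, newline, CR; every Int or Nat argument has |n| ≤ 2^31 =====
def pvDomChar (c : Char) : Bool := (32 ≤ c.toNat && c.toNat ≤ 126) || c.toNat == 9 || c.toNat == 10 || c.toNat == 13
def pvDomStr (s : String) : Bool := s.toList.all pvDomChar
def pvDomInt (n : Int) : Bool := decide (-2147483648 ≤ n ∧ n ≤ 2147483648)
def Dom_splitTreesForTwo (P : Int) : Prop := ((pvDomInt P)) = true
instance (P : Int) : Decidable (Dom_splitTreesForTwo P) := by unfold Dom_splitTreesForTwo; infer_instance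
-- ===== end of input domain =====

-- B replaces A's linear downward scan for the largest i with C(i,3) ≤ P by doubling
-- plus binary search (measured faster at the large sizes); same return value.
-- Each Python loop is ported as structural recursion on an exact iteration counter
-- (the loop's own termination measure); each step is the loop body, step for step.

-- helper `combinations` shared by both Python files, transliterated once
def pyCombinations (n : Int) : Int := PySem.Int.floordiv (n * (n - 1) * (n - 2)) 6

-- ===== PORT A =====
-- `for i in range(P,2,-1): if … : break`, counting down from i; the fuel-0 case is
-- the loop exhausting with i left at 3 (only reachable there; unreachable for P ≥ 4)
def pyScanAGo (P : Int) : Nat → Int → Int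
  | 0, _ => 3
  | n + 1, i =>
    if pyCombinations i ≤ P ∧ P - pyCombinations i ≥ 0 then i
    else pyScanAGo P n (i - 1)

def pyScanA (P i : Int) : Int := pyScanAGo P (i - 2).toNat i

-- `while P > 0:` — P drops by at least 1 per pass, so P.toNat passes suffice
def pySplitGoA : Nat → Int → List Int
  | 0, _ => []
  | n + 1, P =>
    if 0 < P then
      if P < 4 then 3 :: pySplitGoA n (P - 1)
      else
        let i := pyScanA P P
        i :: pySplitGoA n (P - pyCombinations i)
    else []

def splitTreesForTwo (P : Int) : List Int := pySplitGoA P.toNat P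

-- ===== PORT B =====
-- `hi = 4; while combinations(hi) <= P: hi *= 2` — hi grows by at least 4 per pass
def pyGrowGo (P : Int) : Nat → Int → Int
  | 0, hi => hi
  | n + 1, hi => if pyCombinations hi ≤ P then pyGrowGo P n (2 * hi) else hi

def pyGrowHi (P : Int) : Int := pyGrowGo P (P.toNat + 1) 4

-- `while hi - lo > 1: mid = (lo+hi)//2; …` — the gap shrinks by at least 1 per pass
def pyBsGo (P : Int) : Nat → Int → Int → Int
  | 0, lo, _ => lo
  | n + 1, lo, hi =>
    if 1 < hi - lo then
      let mid := PySem.Int.floordiv (lo + hi) 2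
      if pyCombinations mid ≤ P then pyBsGo P n mid hi else pyBsGo P n lo mid
    else lo

def pyBsearch (P lo hi : Int) : Int := pyBsGo P (hi - lo).toNat lo hi

-- `while P >= 4:` plus the final `forest.extend([3] * P)`
def pySplitGoB : Nat → Int → List Int
  | 0, _ => []
  | n + 1, P =>
    if 4 ≤ P then
      let hi := pyGrowHi P
      let lo := pyBsearch P 3 hi
      lo :: pySplitGoB n (P - pyCombinations lo)
    else List.replicate P.toNat 3

def splitTreesForTwo_alt (P : Int) : List Int := pySplitGoB P.toNat P

-- ===== PRECONDITION & SPEC =====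
def Spec_splitTreesForTwo (P : Int) (out : List Int) : Prop := out = splitTreesForTwo_alt P
instance (P : Int) (out : List Int) : Decidable (Spec_splitTreesForTwo P out) := by unfold Spec_splitTreesForTwo; infer_instance

-- ===== CLAIM (what is proved, stated in full; the proofs are below) =====
def Claim_equal_splitTreesForTwo : Prop := ∀ (P : Int), Dom_splitTreesForTwo P → Spec_splitTreesForTwo P (splitTreesForTwo P)

-- ===== LEMMAS AND PROOFS =====

theorem pyCombinations_pos {i : Int} (h : 3 ≤ i) : 1 ≤ pyCombinations i := by
  unfold pyCombinations
  rw [PySem.Int.le_floordiv_iff_mul_le (by omega)]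
  nlinarith [mul_nonneg (mul_nonneg (by omega : (0:Int) ≤ i-3) (by omega : (0:Int) ≤ i-1))
      (by omega : (0:Int) ≤ i-2),
    mul_nonneg (by omega : (0:Int) ≤ i-1) (by omega : (0:Int) ≤ i-2)]

theorem pyCombinations_ge_self {hi : Int} (h : 4 ≤ hi) : hi ≤ pyCombinations hi := by
  unfold pyCombinations
  rw [PySem.Int.le_floordiv_iff_mul_le (by omega)]
  nlinarith [mul_nonneg (mul_nonneg (by omega : (0:Int) ≤ hi-4) (by omega : (0:Int) ≤ hi-1))
      (by omega : (0:Int) ≤ hi-2),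
    mul_nonneg (by omega : (0:Int) ≤ hi-1) (by omega : (0:Int) ≤ hi-2)]

-- the cubic n(n-1)(n-2) is monotone on [2, ∞)
theorem cubic_mono {x y : Int} (h2 : 2 ≤ x) (hxy : x ≤ y) :
    x * (x - 1) * (x - 2) ≤ y * (y - 1) * (y - 2) := by
  nlinarith [mul_nonneg (mul_nonneg (by omega : (0:Int) ≤ y-x) (by omega : (0:Int) ≤ y-1))
      (by omega : (0:Int) ≤ y-2),
    mul_nonneg (mul_nonneg (by omega : (0:Int) ≤ y-x) (by omega : (0:Int) ≤ x-1))
      (by omega : (0:Int) ≤ y-2),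
    mul_nonneg (mul_nonneg (by omega : (0:Int) ≤ y-x) (by omega : (0:Int) ≤ x-1))
      (by omega : (0:Int) ≤ x-2)]

theorem pyCombinations_mono {x y : Int} (h2 : 2 ≤ x) (hxy : x ≤ y) :
    pyCombinations x ≤ pyCombinations y := by
  unfold pyCombinations
  rw [PySem.Int.le_floordiv_iff_mul_le (by omega)]
  have h := PySem.Int.floordiv_mul_add_mod (x * (x - 1) * (x - 2)) 6
  have hm : PySem.Int.mod (x * (x - 1) * (x - 2)) 6 = (x * (x - 1) * (x - 2)) % 6 :=
    PySem.Int.mod_eq_emod_of_pos (by omega)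
  have hb := Int.emod_nonneg (x * (x - 1) * (x - 2)) (by omega : (6:Int) ≠ 0)
  have := cubic_mono h2 hxy
  omega

-- the common characterisation: r is the greatest tree size with C(r,3) ≤ P
def GoodRoot (P r : Int) : Prop :=
  3 ≤ r ∧ pyCombinations r ≤ P ∧ P < pyCombinations (r + 1)

theorem goodRoot_unique {P r s : Int} (hr : GoodRoot P r) (hs : GoodRoot P s) : r = s := by
  rcases hr with ⟨hr3, hrle, hrlt⟩
  rcases hs with ⟨hs3, hsle, hslt⟩
  by_contra hne
  rcases lt_or_gt_of_ne hne with h | h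
  · have : pyCombinations (r + 1) ≤ pyCombinations s := pyCombinations_mono (by omega) (by omega)
    omega
  · have : pyCombinations (s + 1) ≤ pyCombinations r := pyCombinations_mono (by omega) (by omega)
    omega

theorem pyCombinations_three : pyCombinations 3 = 1 := by decide

theorem lt_pyCombinations_succ_self {P : Int} (h : 4 ≤ P) : P < pyCombinations (P + 1) := by
  have : P + 1 ≤ pyCombinations (P + 1) := by
    unfold pyCombinations
    rw [PySem.Int.le_floordiv_iff_mul_le (by omega)]
    nlinarith [mul_nonneg (by omega : (0:Int) ≤ P-3) (by omega : (0:Int) ≤ P+1),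
      mul_nonneg (by omega : (0:Int) ≤ P) (by omega : (0:Int) ≤ P-1)]
  omega

theorem pyScanAGo_good {P : Int} (hP : 1 ≤ P) :
    ∀ (n : Nat) (i : Int), (i - 2).toNat = n → 3 ≤ i → P < pyCombinations (i + 1) →
      GoodRoot P (pyScanAGo P n i) := by
  intro n
  induction n with
  | zero => intro i hfuel h3 _; omega
  | succ n ih =>
    intro i hfuel h3 htop
    rw [pyScanAGo]
    by_cases hc : pyCombinations i ≤ P ∧ P - pyCombinations i ≥ 0
    · rw [if_pos hc]; exact ⟨h3, hc.1, htop⟩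
    · rw [if_neg hc]
      rcases eq_or_lt_of_le h3 with heq | hlt
      · exfalso
        have hone : pyCombinations i = 1 := by rw [← heq]; exact pyCombinations_three
        exact hc ⟨by omega, by omega⟩
      · have hgt : P < pyCombinations i := by
          by_contra hn
          exact hc ⟨by omega, by omega⟩
        exact ih (i - 1) (by omega) (by omega) (by simpa using hgt)

theorem pyScanA_good {P : Int} (h : 4 ≤ P) : GoodRoot P (pyScanA P P) :=
  pyScanAGo_good (by omega) (P - 2).toNat P rfl (by omega)
    (lt_pyCombinations_succ_self h)

theorem pyGrowGo_spec {P : Int} :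
    ∀ (n : Nat) (hi : Int), 4 ≤ hi → (P + 1 - hi).toNat + 1 ≤ n →
      hi ≤ pyGrowGo P n hi ∧ P < pyCombinations (pyGrowGo P n hi) := by
  intro n
  induction n with
  | zero => intro hi _ hfuel; omega
  | succ n ih =>
    intro hi h4 hfuel
    rw [pyGrowGo]
    by_cases hc : pyCombinations hi ≤ P
    · rw [if_pos hc]
      have hhiP : hi ≤ P := le_trans (pyCombinations_ge_self h4) hc
      have := ih (2 * hi) (by omega) (by omega)
      exact ⟨by omega, this.2⟩
    · rw [if_neg hc]
      exact ⟨le_refl _, by omega⟩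

theorem pyGrowHi_spec {P : Int} : 4 ≤ pyGrowHi P ∧ P < pyCombinations (pyGrowHi P) := by
  have := pyGrowGo_spec (P := P) (P.toNat + 1) 4 (by omega) (by omega)
  exact ⟨this.1, this.2⟩

theorem pyBsGo_good {P : Int} :
    ∀ (n : Nat) (lo hi : Int), (hi - lo).toNat ≤ n → 3 ≤ lo → lo < hi →
      pyCombinations lo ≤ P → P < pyCombinations hi → GoodRoot P (pyBsGo P n lo hi) := by
  intro n
  induction n with
  | zero => intro lo hi hfuel _ hlt _ _; omega
  | succ n ih =>
    intro lo hi hfuel h3 hlt hlo hhi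
    rw [pyBsGo]
    by_cases hgap : 1 < hi - lo
    · rw [if_pos hgap]
      have hfd := PySem.Int.floordiv_mul_add_mod (lo + hi) 2
      have hm := PySem.Int.mod_two_eq (lo + hi)
      by_cases hc : pyCombinations (PySem.Int.floordiv (lo + hi) 2) ≤ P
      · simp only [if_pos hc]
        exact ih _ hi (by omega) (by omega) (by omega) hc hhi
      · simp only [if_neg hc]
        exact ih lo _ (by omega) h3 (by omega) hlo (by omega)
    · rw [if_neg hgap]
      have he : hi = lo + 1 := by omega
      exact ⟨h3, hlo, by rw [← he]; exact hhi⟩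

theorem pyBsearch_good {P : Int} (h : 4 ≤ P) : GoodRoot P (pyBsearch P 3 (pyGrowHi P)) := by
  have hg := pyGrowHi_spec (P := P)
  exact pyBsGo_good (pyGrowHi P - 3).toNat 3 (pyGrowHi P) (le_refl _) (by omega)
    (by omega) (by rw [pyCombinations_three]; omega) hg.2

-- the greedy steps agree: A's scan and B's doubling + binary search pick the same root
theorem step_eq {P : Int} (h : 4 ≤ P) : pyScanA P P = pyBsearch P 3 (pyGrowHi P) :=
  goodRoot_unique (pyScanA_good h) (pyBsearch_good h)

theorem goB_small {n : Nat} {Q : Int} (h4 : Q < 4) (hn : Q.toNat ≤ n) :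
    pySplitGoB n Q = List.replicate Q.toNat 3 := by
  cases n with
  | zero =>
    have : Q.toNat = 0 := by omega
    rw [pySplitGoB, this]; rfl
  | succ n => rw [pySplitGoB, if_neg (by omega)]

theorem go_eq : ∀ (n : Nat) (P : Int), P.toNat ≤ n → pySplitGoA n P = pySplitGoB n P := by
  intro n
  induction n with
  | zero => intro P hP; rfl
  | succ n ih =>
    intro P hP
    by_cases h0 : 0 < P
    · by_cases h4 : P < 4
      · rw [pySplitGoA, if_pos h0, if_pos h4, ih (P - 1) (by omega),
          goB_small (by omega) (by omega), goB_small (Q := P) (by omega) (by omega)]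
        have hs : P.toNat = (P - 1).toNat + 1 := by omega
        rw [hs, List.replicate_succ]
      · have h4' : 4 ≤ P := by omega
        rw [pySplitGoA, if_pos h0, if_neg h4, pySplitGoB, if_pos h4']
        show pyScanA P P :: pySplitGoA n (P - pyCombinations (pyScanA P P)) =
          pyBsearch P 3 (pyGrowHi P) ::
            pySplitGoB n (P - pyCombinations (pyBsearch P 3 (pyGrowHi P)))
        rw [step_eq h4']
        congr 1
        have h3 := (pyBsearch_good h4').1
        have := pyCombinations_pos h3
        exact ih _ (by omega)
    · rw [pySplitGoA, if_neg h0, goB_small (by omega) (by omega)]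
      have : P.toNat = 0 := by omega
      rw [this]; rfl

-- ===== VERDICT (by name: the statement is the Claim_ definition above) =====
theorem splitTreesForTwo_spec : Claim_equal_splitTreesForTwo := by
  intro P _
  unfold Spec_splitTreesForTwo splitTreesForTwo splitTreesForTwo_alt
  exact go_eq P.toNat P (le_refl _)
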